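-- pv_equiv track=rewrite | github.com/taemchoi/python | 5_days.py | solution
-- ===== SOURCE A (Python) =====
-- def solution(scoville, K):
--     answer = 0
--     for i in range(len(scoville)):
--         scoville[0] = scoville.pop(0) + (scoville[0]*2)
--         answer +=1
--         if any(j<K for j in scoville) == False:
--             break
--
--     return answer
-- ===== SOURCE B (Python) =====
-- # One-pass re-implementation: running "mixed head" value via a prefix-sum
-- # accumulator plus the precomputed last index whose value is below K,
-- # instead of repeatedly popping and rescanning the list.
-- # Note: A mutates its argument in place (pop); B does not (return value only).
-- # Where A raises IndexError (nonempty lists that can never be made all >= K),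
-- # B returns -1.
-- def solution(scoville, K):
--     n = len(scoville)
--     if n == 0:
--         return 0
--     last_below = 0
--     for j in range(1, n):
--         if scoville[j] < K:
--             last_below = j
--     acc = scoville[0]
--     for t in range(1, n):
--         acc += 2 * scoville[t]
--         if t >= last_below and acc >= K:
--             return t
--     return -1
-- ===== Notes on version B (the rewrite author's own statement) =====
-- stated objective: faster
-- what changed: Replaces the quadratic loop of pop(0)-mixes with an any()-rescan per step by a single O(n) pass: the head after t mixes is scoville[0]+2*sum(scoville[1:t+1]) (running accumulator), and the tail condition is t >= the last index whose value is below K, precomputed once; B returns -1 (outside Pre_) where A raises IndexError.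
import Mathlib
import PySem

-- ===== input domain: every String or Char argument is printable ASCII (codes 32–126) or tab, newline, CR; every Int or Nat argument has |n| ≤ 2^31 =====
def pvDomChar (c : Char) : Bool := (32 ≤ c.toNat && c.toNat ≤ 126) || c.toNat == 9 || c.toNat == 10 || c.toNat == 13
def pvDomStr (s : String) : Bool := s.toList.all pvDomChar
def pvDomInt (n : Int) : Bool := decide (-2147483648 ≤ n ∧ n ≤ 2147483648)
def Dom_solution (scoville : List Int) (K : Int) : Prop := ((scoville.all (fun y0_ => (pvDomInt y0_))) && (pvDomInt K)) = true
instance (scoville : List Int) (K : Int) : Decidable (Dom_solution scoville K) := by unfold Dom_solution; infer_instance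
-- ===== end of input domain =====

-- B replaces A's quadratic pop(0)+rescan loop by one O(n) pass (running head
-- accumulator + precomputed last index below K); equivalence is about the
-- RETURN value only (A mutates its list argument in place, B does not).

-- ===== PORT A =====
-- loop over range(len(scoville)); each iteration: scoville[0] = scoville.pop(0) + scoville[0]*2;
-- answer += 1; break when no element < K.  A state with fewer than 2 elements at an
-- iteration raises IndexError in Python; the port returns `ans` there (excluded by Pre_).
def solAGo (K : Int) : List Int → Int → Nat → Int
  | a :: b :: rest, ans, fuel+1 =>
      if ((a + 2*b) :: rest).any (fun j => decide (j < K)) then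
        solAGo K ((a + 2*b) :: rest) (ans + 1) fuel
      else ans + 1
  | _, ans, _ => ans

def solution (scoville : List Int) (K : Int) : Int :=
  solAGo K scoville 0 scoville.length

-- ===== PORT B =====
-- last_below = last index j in [1, n-1] with scoville[j] < K (0 if none)
def solLastBelow (scoville : List Int) (K : Int) : Nat :=
  (List.range' 1 (scoville.length - 1)).foldl
    (fun L j => if scoville.getD j 0 < K then j else L) 0

-- the second loop of Source B: for t in range(1, n): acc += 2*scoville[t]; early return t
def solBGo (scoville : List Int) (K : Int) (L : Nat) : Int → List Nat → Option Int
  | _, [] => none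
  | acc, t :: ts =>
      if L ≤ t ∧ K ≤ acc + 2 * scoville.getD t 0 then some (t : Int)
      else solBGo scoville K L (acc + 2 * scoville.getD t 0) ts

def solution_alt (scoville : List Int) (K : Int) : Int :=
  if scoville.length = 0 then 0
  else
    match solBGo scoville K (solLastBelow scoville K) (scoville.headD 0)
            (List.range' 1 (scoville.length - 1)) with
    | some t => t
    | none => -1

-- ===== PRECONDITION & SPEC =====
-- Pre_ excludes exactly the inputs where A raises IndexError: nonempty lists for which
-- no number t ≤ n-1 of mixes makes every remaining element ≥ K (the head after t mixes
-- is scoville[0] + 2*sum(scoville[1:t+1]), the rest is scoville[t+1:]).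
def Pre_solution (scoville : List Int) (K : Int) : Prop :=
  scoville = [] ∨ ∃ t < scoville.length, 1 ≤ t ∧
    K ≤ scoville.headD 0 + 2 * (scoville.tail.take t).sum ∧
    ∀ x ∈ scoville.drop (t+1), K ≤ x
instance (scoville : List Int) (K : Int) : Decidable (Pre_solution scoville K) := by
  unfold Pre_solution; infer_instance

def pvWitness_solution : List Int × Int := ([1, 2, 3], 7)

def Spec_solution (scoville : List Int) (K : Int) (out : Int) : Prop := out = solution_alt scoville K
instance (scoville : List Int) (K : Int) (out : Int) : Decidable (Spec_solution scoville K out) := by unfold Spec_solution; infer_instance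

-- ===== CLAIM (what is proved, stated in full; the proofs are below) =====
def Claim_equal_solution : Prop := ∀ (scoville : List Int) (K : Int), Dom_solution scoville K → Pre_solution scoville K → Spec_solution scoville K (solution scoville K)

-- ===== LEMMAS AND PROOFS =====

-- the fold computing solLastBelow never goes below a common lower bound of
-- its seed and the scanned indices
lemma fold_last_lb (p : Nat → Prop) [DecidablePred p] (l : List Nat) :
    ∀ (L0 c : Nat), c ≤ L0 → (∀ j ∈ l, c ≤ j) →
      c ≤ l.foldl (fun L j => if p j then j else L) L0 := by
  induction l with
  | nil => intro L0 c h _; simpa using h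
  | cons j l ih =>
      intro L0 c h hall
      simp only [List.foldl_cons]
      exact ih _ c (by by_cases hp : p j <;> simp [hp, h, hall j (by simp)])
        (fun x hx => hall x (by simp [hx]))

-- characterisation of the "last index satisfying p" fold over range' s m
lemma fold_last_le_iff (p : Nat → Prop) [DecidablePred p] :
    ∀ (m s L0 t : Nat), L0 ≤ t →
      ((List.range' s m).foldl (fun L j => if p j then j else L) L0 ≤ t ↔
        ∀ j, s ≤ j → j < s + m → p j → j ≤ t) := by
  intro m
  induction m with
  | zero => intro s L0 t h; simp [h]; omega
  | succ m ih =>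
      intro s L0 t h
      rw [List.range'_succ]
      simp only [List.foldl_cons]
      by_cases hp : p s
      · simp only [hp, if_true]
        by_cases hst : s ≤ t
        · rw [ih (s+1) s t hst]
          constructor
          · intro hfold j h1 h2 h3
            rcases Nat.eq_or_lt_of_le h1 with rfl | hlt
            · exact hst
            · exact hfold j hlt (by omega) h3
          · intro hall j h1 h2 h3; exact hall j (by omega) (by omega) h3
        · have hge : s ≤ (List.range' (s+1) m).foldl (fun L j => if p j then j else L) s :=
            fold_last_lb p _ s s (le_refl s)
              (fun j hj => by have := List.mem_range'_1.mp hj; omega)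
          constructor
          · intro hfold; omega
          · intro hall; exact absurd (hall s (le_refl s) (by omega) hp) hst
      · simp only [hp, if_false]
        rw [ih (s+1) L0 t h]
        constructor
        · intro hall j h1 h2 h3
          rcases Nat.eq_or_lt_of_le h1 with rfl | hlt
          · exact absurd h3 hp
          · exact hall j hlt (by omega) h3
        · intro hall j h1 h2 h3; exact hall j (by omega) (by omega) h3

-- membership in a drop ↔ indexed quantification
lemma forall_drop_iff (sc : List Int) (K : Int) (m : Nat) :
    (∀ x ∈ sc.drop m, K ≤ x) ↔ ∀ j, m ≤ j → j < sc.length → K ≤ sc.getD j 0 := by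
  constructor
  · intro h j hm hj
    have hget : sc.getD j 0 = sc[j] := List.getD_eq_getElem sc 0 hj
    rw [hget]
    apply h
    have : sc[j] = (sc.drop m)[j - m]'(by simp; omega) := by
      rw [List.getElem_drop]
      congr 1; omega
    rw [this]
    exact List.getElem_mem _
  · intro h x hx
    obtain ⟨i, hi, hx⟩ := List.mem_iff_getElem.mp hx
    have hil : m + i < sc.length := by simp at hi; omega
    have : x = sc[m + i] := by rw [← hx, List.getElem_drop]
    rw [this, ← List.getD_eq_getElem sc 0 hil]
    exact h (m + i) (by omega) hil

-- solLastBelow ≤ t ↔ every element of scoville after position t is ≥ K (for 1 ≤ t, nonempty list)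
lemma lastBelow_le_iff (sc : List Int) (K : Int) (hne : sc ≠ []) (t : Nat) (ht : 1 ≤ t) :
    (solLastBelow sc K ≤ t ↔ ∀ x ∈ sc.drop (t+1), K ≤ x) := by
  have hn : 1 ≤ sc.length := by
    cases sc with | nil => simp at hne | cons a l => simp
  unfold solLastBelow
  rw [fold_last_le_iff (fun j => sc.getD j 0 < K) (sc.length - 1) 1 0 t (Nat.zero_le t),
      forall_drop_iff]
  constructor
  · intro h j h1 h2
    by_contra hK
    have := h j (by omega) (by omega) (by omega)
    omega
  · intro h j h1 h2 h3
    by_contra hgt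
    have := h j (by omega) (by omega)
    omega

-- !any(< K) on a cons cell, spelled out
lemma any_false_iff (K a : Int) (l : List Int) :
    ((a :: l).any (fun j => decide (j < K)) = false) ↔ (K ≤ a ∧ ∀ x ∈ l, K ≤ x) := by
  rw [List.any_eq_false]
  simp [not_lt]

-- step facts from sc.drop (k+1) = b :: rest'
lemma drop_succ_of_drop_cons (sc : List Int) (k : Nat) (b : Int) (rest' : List Int)
    (h : sc.drop (k+1) = b :: rest') : sc.drop (k+2) = rest' := by
  have h2 := congrArg List.tail h
  rw [List.tail_drop] at h2
  simpa using h2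

lemma getElem?_of_drop_cons (sc : List Int) (k : Nat) (b : Int) (rest' : List Int)
    (h : sc.drop (k+1) = b :: rest') : sc[k+1]? = some b := by
  have h2 := congrArg (fun (l : List Int) => l[0]?) h
  simpa [List.getElem?_drop] using h2

lemma getD_of_drop_cons (sc : List Int) (k : Nat) (b : Int) (rest' : List Int)
    (h : sc.drop (k+1) = b :: rest') : sc.getD (k+1) 0 = b := by
  rw [List.getD_eq_getElem?_getD, getElem?_of_drop_cons sc k b rest' h]; rfl

lemma take_sum_succ_of_drop_cons (sc : List Int) (k : Nat) (b : Int) (rest' : List Int)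
    (h : sc.drop (k+1) = b :: rest') :
    (sc.tail.take (k+1)).sum = (sc.tail.take k).sum + b := by
  have htail : sc.tail[k]? = some b := by
    have hd : sc.tail.drop k = b :: rest' := by
      rw [← List.drop_one, List.drop_drop, Nat.add_comm]; exact h
    have h2 := congrArg (fun (l : List Int) => l[0]?) hd
    simpa [List.getElem?_drop] using h2
  rw [List.take_add_one, htail]
  simp

-- main correspondence: after k mixes, A's loop state is (a :: sc.drop (k+1)) with
-- a = sc[0] + 2*sum(sc[1:k+1]); under the existence of a later break step both
-- loops stop at the same step count t.
lemma sol_main (sc : List Int) (K : Int) :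
    ∀ (rest : List Int) (k : Nat) (a : Int),
      sc.drop (k+1) = rest →
      a = sc.headD 0 + 2 * (sc.tail.take k).sum →
      (∃ t, k+1 ≤ t ∧ t < sc.length ∧
        K ≤ sc.headD 0 + 2 * (sc.tail.take t).sum ∧ ∀ x ∈ sc.drop (t+1), K ≤ x) →
      ∃ t : Nat,
        solBGo sc K (solLastBelow sc K) a (List.range' (k+1) rest.length) = some (t : Int) ∧
        solAGo K (a :: rest) (k : Int) (rest.length + 1) = (t : Int) := by
  intro rest
  induction rest with
  | nil =>
      intro k a hdrop _ ⟨t, ht1, ht2, _⟩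
      have : sc.length ≤ k + 1 := List.drop_eq_nil_iff.mp hdrop
      omega
  | cons b rest' ih =>
      intro k a hdrop hsum ⟨t, ht1, ht2, htH, htT⟩
      have hne : sc ≠ [] := by
        intro h; rw [h] at hdrop; simp at hdrop
      have hdrop2 : sc.drop (k+2) = rest' := drop_succ_of_drop_cons sc k b rest' hdrop
      have hgetD : sc.getD (k+1) 0 = b := getD_of_drop_cons sc k b rest' hdrop
      have hsum2 : sc.headD 0 + 2 * (sc.tail.take (k+1)).sum = a + 2 * b := by
        rw [take_sum_succ_of_drop_cons sc k b rest' hdrop, hsum]; ring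
      have hL := lastBelow_le_iff sc K hne (k+1) (by omega)
      rw [hdrop2] at hL
      -- the break condition at step k+1
      by_cases hbrk : K ≤ a + 2 * b ∧ ∀ x ∈ rest', K ≤ x
      · refine ⟨k+1, ?_, ?_⟩
        · simp only [List.length_cons]
          rw [List.range'_succ]
          unfold solBGo
          rw [hgetD, if_pos ⟨hL.mpr hbrk.2, hbrk.1⟩]
        · show solAGo K (a :: b :: rest') (k : Int) (rest'.length + 1 + 1) = _
          unfold solAGo
          have hany : ((a + 2*b) :: rest').any (fun j => decide (j < K)) = false :=
            (any_false_iff K (a + 2*b) rest').mpr hbrk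
          rw [hany]
          simp
      · have hanyT : ((a + 2*b) :: rest').any (fun j => decide (j < K)) = true := by
          by_contra h
          exact hbrk ((any_false_iff K (a + 2*b) rest').mp (by simpa using h))
        have hcond : ¬ (solLastBelow sc K ≤ k+1 ∧ K ≤ a + 2 * sc.getD (k+1) 0) := by
          rw [hgetD]
          intro ⟨h1, h2⟩
          exact hbrk ⟨h2, hL.mp h1⟩
        have hnext : ∃ t, k+2 ≤ t ∧ t < sc.length ∧
            K ≤ sc.headD 0 + 2 * (sc.tail.take t).sum ∧ ∀ x ∈ sc.drop (t+1), K ≤ x := by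
          refine ⟨t, ?_, ht2, htH, htT⟩
          rcases Nat.eq_or_lt_of_le ht1 with rfl | hlt
          · exfalso
            apply hbrk
            constructor
            · rw [← hsum2]; exact htH
            · rw [← hdrop2]; exact htT
          · omega
        obtain ⟨t', hB, hA⟩ := ih (k+1) (a + 2*b) hdrop2 hsum2.symm hnext
        refine ⟨t', ?_, ?_⟩
        · simp only [List.length_cons]
          rw [List.range'_succ]
          unfold solBGo
          rw [if_neg hcond, hgetD]
          exact hB
        · show solAGo K (a :: b :: rest') (k : Int) (rest'.length + 1 + 1) = _
          unfold solAGo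
          rw [hanyT]
          simp only [if_true]
          have : ((k : Int) + 1) = ((k + 1 : Nat) : Int) := by push_cast; ring
          rw [this]
          exact hA

-- ===== VERDICT (by name: the statement is the Claim_ definition above) =====
theorem solution_spec : Claim_equal_solution := by
  intro sc K _ hpre
  unfold Spec_solution
  cases sc with
  | nil => rfl
  | cons a rest0 =>
      rcases hpre with h | ⟨t, ht2, ht1, htH, htT⟩
      · simp at h
      · obtain ⟨t', hB, hA⟩ := sol_main (a :: rest0) K rest0 0 a (by simp)
          (by simp) ⟨t, by omega, ht2, htH, htT⟩
        have hsolA : solution (a :: rest0) K = (t' : Int) := by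
          unfold solution
          simpa using hA
        have hsolB : solution_alt (a :: rest0) K = (t' : Int) := by
          unfold solution_alt
          rw [if_neg (by simp)]
          have hlen : (a :: rest0).length - 1 = rest0.length := by simp
          rw [hlen]
          have hhd : (a :: rest0).headD 0 = a := rfl
          rw [hhd, hB]
        rw [hsolA, hsolB]
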